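-- pv_equiv track=rewrite | github.com/lblanes25/control-description-analyzer | enhanced_what.py | determine_if_process
-- ===== SOURCE A (Python) =====
-- from typing import Dict, List, Any, Optional, Tuple, Set
--
-- def determine_if_process(candidates: List[Dict], text: str) -> bool:
--     """
--     Determine if this is describing a process rather than a single control
--
--     Args:
--         candidates: List of action candidates
--         text: The full control description
--
--     Returns:
--         Boolean indicating if this is likely a process description
--     """
--     # Indicators:
--     # 1. More than 3 distinct action verbs
--     # 2. Presence of sequence markers
--     # 3. Length of text (very long descriptions often describe processes)
--
--     # Count distinct verbs
--     distinct_verbs = set(c["verb_lemma"] for c in candidates)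
--
--     # Process indicators score
--     process_indicators = 0
--
--     if len(distinct_verbs) > 3:
--         process_indicators += 2
--
--     # Check for sequence markers
--     sequence_markers = ["then", "after", "before", "next", "subsequently",
--                         "finally", "lastly", "following"]
--
--     for marker in sequence_markers:
--         if marker in text.lower():
--             process_indicators += 1
--             break
--
--     # Check text length
--     if len(text.split()) > 50:  # If more than 50 words
--         process_indicators += 1
--
--     return process_indicators >= 3
-- ===== SOURCE B (Python) =====
-- def determine_if_process(candidates, text):
--     """Sort-then-scan re-implementation with an early-return chain:
--     distinct verbs counted as runs in the sorted lemma list (no set, no score)."""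
--     lemmas = sorted(c["verb_lemma"] for c in candidates)
--     distinct = (1 if lemmas else 0) + sum(
--         1 for a, b in zip(lemmas, lemmas[1:]) if a != b)
--     if distinct <= 3:
--         return False
--     low = text.lower()
--     for marker in ("then", "after", "before", "next", "subsequently",
--                    "finally", "lastly", "following"):
--         if marker in low:
--             return True
--     return len(text.split()) > 50
-- ===== Notes on version B (the rewrite author's own statement) =====
-- stated objective: alternative
-- what changed: Counts distinct verbs by sorting the lemma list and counting run boundaries (sort-then-scan) instead of building a hash set, and replaces A's running indicator score and threshold with an early-return chain: return False unless more than 3 distinct verbs, then return True on the first sequence marker found, else fall through to the 50-word test.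
import Mathlib
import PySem

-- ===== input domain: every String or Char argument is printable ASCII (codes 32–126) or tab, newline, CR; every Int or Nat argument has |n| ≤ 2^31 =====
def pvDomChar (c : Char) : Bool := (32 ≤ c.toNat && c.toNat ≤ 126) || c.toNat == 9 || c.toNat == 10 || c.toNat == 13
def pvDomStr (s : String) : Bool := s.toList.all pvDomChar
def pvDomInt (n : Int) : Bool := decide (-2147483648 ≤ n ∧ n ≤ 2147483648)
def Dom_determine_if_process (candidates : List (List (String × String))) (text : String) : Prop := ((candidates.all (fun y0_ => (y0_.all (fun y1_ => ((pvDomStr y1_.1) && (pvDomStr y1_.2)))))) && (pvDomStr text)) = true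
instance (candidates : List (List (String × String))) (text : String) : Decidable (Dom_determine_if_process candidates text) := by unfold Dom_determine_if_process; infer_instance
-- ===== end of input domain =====

-- ===== PORT A =====
-- B replaces A's hash set + running indicator score by sort-then-scan run counting and an
-- early-return chain (objective: alternative); equal under Pre_ (every candidate has key "verb_lemma").
def pvMarkers : List String := ["then", "after", "before", "next", "subsequently",
                                "finally", "lastly", "following"]

-- A's `for marker in sequence_markers: if marker in text.lower(): score += 1; break`
def pvMarkerLoop (markers : List String) (lowText : String) (score : Int) : Int :=
  match markers with
  | [] => score
  | m :: rest => if PySem.Str.isIn m lowText then score + 1 else pvMarkerLoop rest lowText score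

def determine_if_process (candidates : List (List (String × String))) (text : String) : Bool :=
  let distinct_verbs : PySem.Set String :=
    PySem.Set.ofList (candidates.map (fun c => PySem.Dict.getD ⟨c⟩ "verb_lemma" ""))
  let s0 : Int := 0
  let s1 : Int := if PySem.Set.len distinct_verbs > 3 then s0 + 2 else s0
  let s2 : Int := pvMarkerLoop pvMarkers (PySem.Str.lower text) s1
  let s3 : Int := if (PySem.Str.split₀ text).length > 50 then s2 + 1 else s2
  decide (s3 ≥ 3)

-- ===== PORT B =====
-- B's marker loop with early `return True`, falling through to the word-count test
def pvMarkerOrLong (markers : List String) (low : String) (text : String) : Bool :=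
  match markers with
  | [] => decide ((PySem.Str.split₀ text).length > 50)
  | m :: rest => if PySem.Str.isIn m low then true else pvMarkerOrLong rest low text

def determine_if_process_alt (candidates : List (List (String × String))) (text : String) : Bool :=
  let lemmas : List String :=
    PySem.List.sorted (candidates.map (fun c => PySem.Dict.getD ⟨c⟩ "verb_lemma" "")) (fun x => x) false
  let distinct : Int := (if lemmas = [] then 0 else 1) +
    (((lemmas.zip (lemmas.drop 1)).countP (fun p => p.1 ≠ p.2) : Nat) : Int)
  if distinct ≤ 3 then false
  else pvMarkerOrLong pvMarkers (PySem.Str.lower text) text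

-- ===== PRECONDITION & SPEC =====
-- Pre_ excludes candidates lacking the key "verb_lemma", on which Python A raises KeyError (B raises too).
def Pre_determine_if_process (candidates : List (List (String × String))) (text : String) : Prop :=
  ∀ c ∈ candidates, (PySem.Dict.get? (⟨c⟩ : PySem.Dict String String) "verb_lemma").isSome = true
instance (candidates : List (List (String × String))) (text : String) : Decidable (Pre_determine_if_process candidates text) := by unfold Pre_determine_if_process; infer_instance

def pvWitness_determine_if_process : (List (List (String × String))) × String :=
  ([[("verb_lemma", "review")]], "then the report is filed")

def Spec_determine_if_process (candidates : List (List (String × String))) (text : String) (out : Bool) : Prop := out = determine_if_process_alt candidates text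
instance (candidates : List (List (String × String))) (text : String) (out : Bool) : Decidable (Spec_determine_if_process candidates text out) := by unfold Spec_determine_if_process; infer_instance

-- ===== CLAIM (what is proved, stated in full; the proofs are below) =====
def Claim_equal_determine_if_process : Prop := ∀ (candidates : List (List (String × String))) (text : String), Dom_determine_if_process candidates text → Pre_determine_if_process candidates text → Spec_determine_if_process candidates text (determine_if_process candidates text)

-- ===== LEMMAS AND PROOFS =====
theorem pvMarkerLoop_eq (markers : List String) (lowText : String) (score : Int) :
    pvMarkerLoop markers lowText score =
      score + (if markers.any (fun m => PySem.Str.isIn m lowText) then 1 else 0) := by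
  induction markers with
  | nil => simp [pvMarkerLoop]
  | cons m rest ih =>
      cases h : PySem.Str.isIn m lowText with
      | true => simp only [pvMarkerLoop, h, List.any_cons, Bool.true_or, if_true]
      | false => simp only [pvMarkerLoop, h, List.any_cons, Bool.false_or, if_false, ih, Bool.false_eq_true]

theorem pvMarkerOrLong_eq (markers : List String) (low text : String) :
    pvMarkerOrLong markers low text =
      (markers.any (fun m => PySem.Str.isIn m low) || decide ((PySem.Str.split₀ text).length > 50)) := by
  induction markers with
  | nil => simp [pvMarkerOrLong]
  | cons m rest ih =>
      simp [pvMarkerOrLong, ih, Bool.or_assoc]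

-- the key of A: the score ≥ 3 test collapses to a boolean formula
theorem pvScoreKey (p q : Prop) [Decidable p] [Decidable q] (b : Bool) :
    decide ((if q then ((if p then (0:Int) + 2 else 0) + (if b then 1 else 0)) + 1
             else ((if p then (0:Int) + 2 else 0) + (if b then 1 else 0))) ≥ 3)
      = (decide p && (b || decide q)) := by
  by_cases hp : p <;> by_cases hq : q <;> cases b <;> simp [hp, hq]

-- run-boundary count of a ≤-sorted list = number of distinct elements
theorem pvRuns_card (xs : List String) (h : xs.Pairwise (· ≤ ·)) :
    (if xs = [] then 0 else 1) + (xs.zip (xs.drop 1)).countP (fun p => p.1 ≠ p.2)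
      = xs.toFinset.card := by
  induction xs with
  | nil => simp
  | cons x rest ih =>
      cases rest with
      | nil => simp
      | cons y t =>
          have hx : ∀ a ∈ y :: t, x ≤ a := List.pairwise_cons.mp h |>.1
          have hp : (y :: t).Pairwise (· ≤ ·) := List.pairwise_cons.mp h |>.2
          have ihr := ih hp
          by_cases hxy : x = y
          · subst hxy
            have hz : ((x :: x :: t).zip ((x :: x :: t).drop 1))
                = (x, x) :: ((x :: t).zip ((x :: t).drop 1)) := rfl
            rw [hz, List.countP_cons]
            simp only [List.toFinset_cons, Finset.insert_idem]
            simpa using ihr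
          · have hnot : x ∉ y :: t := by
              intro hm
              rcases List.mem_cons.mp hm with rfl | hmt
              · exact hxy rfl
              · have h1 : x ≤ y := hx y (by simp)
                have h2 : y ≤ x := (List.pairwise_cons.mp hp).1 x hmt
                exact hxy (le_antisymm h1 h2)
            have hcard : (x :: y :: t).toFinset.card = (y :: t).toFinset.card + 1 := by
              simp only [List.toFinset_cons]
              rw [Finset.card_insert_of_notMem (by simpa using hnot)]
            have hz : ((x :: y :: t).zip ((x :: y :: t).drop 1))
                = (x, y) :: ((y :: t).zip ((y :: t).drop 1)) := rfl
            rw [hz, List.countP_cons, hcard, ← ihr]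
            simp [hxy]
            omega

theorem pvOfList_len (xs : List String) :
    ((PySem.Set.ofList xs).length : Int) = (xs.toFinset.card : Int) := by
  have h1 : (PySem.Set.ofList xs).toFinset = xs.toFinset := by
    ext a; simp [PySem.Set.mem_ofList]
  have h2 := List.toFinset_card_of_nodup (PySem.Set.nodup_ofList xs)
  rw [h1] at h2
  exact_mod_cast h2.symm

theorem pvSorted_toFinset (xs : List String) :
    (PySem.List.sorted xs (fun x => x) false).toFinset = xs.toFinset := by
  have h := PySem.List.sorted_perm xs (fun x => x) false
  ext a; simp [h.mem_iff]

-- B's distinct count equals A's set size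
theorem pvDistinct_eq (lem : List String) :
    ((if PySem.List.sorted lem (fun x => x) false = [] then (0:Int) else 1) +
      (((PySem.List.sorted lem (fun x => x) false).zip
        ((PySem.List.sorted lem (fun x => x) false).drop 1)).countP (fun p => p.1 ≠ p.2) : Nat))
      = PySem.Set.len (PySem.Set.ofList lem) := by
  have hs := pvRuns_card (PySem.List.sorted lem (fun x => x) false)
    (PySem.List.sorted_pairwise lem (fun x => x))
  have : PySem.Set.len (PySem.Set.ofList lem) = ((PySem.Set.ofList lem).length : Int) := by
    simp [PySem.Set.len]
  rw [this, pvOfList_len, ← pvSorted_toFinset lem, ← hs]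
  split <;> push_cast <;> ring

-- ===== VERDICT (by name: the statement is the Claim_ definition above) =====
theorem determine_if_process_spec : Claim_equal_determine_if_process := by
  intro candidates text _ _
  unfold Spec_determine_if_process determine_if_process determine_if_process_alt
  simp only [pvMarkerLoop_eq, pvMarkerOrLong_eq, pvDistinct_eq]
  rw [pvScoreKey]
  have hkey : ∀ n : ℕ, decide (3 < n) = !decide (n ≤ 3) := by
    intro n; by_cases h : 3 < n
    · simp [h, Nat.not_le.mpr h]
    · simp [h, Nat.le_of_not_lt h]
  simp [hkey]
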